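-- pv_equiv track=rewrite | github.com/amyra98/Bugs | Aeronav/Assignment_1/Answer9.py | rare
-- ===== SOURCE A (Python) =====
-- def rare(A,B):
--     A1={};
--     B1={};
--     a1=A.split();
--     b1=B.split();
--     for i in a1:
--         if(i in A1):
--             A1[i]+=1;
--         else:
--             A1[i]=1;
--     for i in b1:
--         if(i in B1):
--             B1[i]+=1;
--         else:
--             B1[i]=1;
--     output=[];
--     for i in A1:
--         if(A1[i]==1 and i not in B1):
--             output.append(i);
--     for i in B1:
--         if(B1[i]==1 and i not in A1):
--             output.append(i);
--     return output
-- ===== SOURCE B (Python) =====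
-- def rare(A, B):
--     counts = {}
--     for w in A.split() + B.split():
--         counts[w] = counts.get(w, 0) + 1
--     return [w for w, c in counts.items() if c == 1]
-- ===== Notes on version B (the rewrite author's own statement) =====
-- stated objective: simpler
-- what changed: Replaces the two per-string count dicts and the two cross-membership filter passes by one combined count over A.split()+B.split(): a word is exclusive to one string iff its total count is exactly 1, and insertion order of the combined dict reproduces A's emission order (A-only words first, then B-only words).
import Mathlib
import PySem

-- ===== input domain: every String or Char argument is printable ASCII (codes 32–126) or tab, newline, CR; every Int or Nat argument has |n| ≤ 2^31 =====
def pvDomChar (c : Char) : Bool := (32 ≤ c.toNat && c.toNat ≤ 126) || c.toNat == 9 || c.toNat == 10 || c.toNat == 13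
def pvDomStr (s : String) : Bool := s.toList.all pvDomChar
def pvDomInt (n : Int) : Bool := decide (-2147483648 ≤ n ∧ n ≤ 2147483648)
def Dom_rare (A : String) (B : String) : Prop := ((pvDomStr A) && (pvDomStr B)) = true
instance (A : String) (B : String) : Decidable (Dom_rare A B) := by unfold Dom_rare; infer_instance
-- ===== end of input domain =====

-- B replaces A's two per-string count dicts and two cross-membership passes by one
-- combined count over both word lists, keeping words whose total count is 1 (simpler).

-- ===== PORT A =====
-- the 'if i in d: d[i]+=1 else: d[i]=1' loop body of A
def rareStep (d : PySem.Dict String Int) (i : String) : PySem.Dict String Int :=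
  if d.contains i then d.insert i (d.getD i 0 + 1) else d.insert i 1

def rare (A : String) (B : String) : List String :=
  let a1 := PySem.Str.split₀ A
  let b1 := PySem.Str.split₀ B
  let A1 := a1.foldl rareStep PySem.Dict.empty
  let B1 := b1.foldl rareStep PySem.Dict.empty
  let output := A1.keys.foldl
    (fun out i => if A1.getD i 0 == 1 && !(B1.contains i) then out ++ [i] else out) []
  B1.keys.foldl
    (fun out i => if B1.getD i 0 == 1 && !(A1.contains i) then out ++ [i] else out) output

-- ===== PORT B =====
def rare_alt (A : String) (B : String) : List String :=
  let words := PySem.Str.split₀ A ++ PySem.Str.split₀ B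
  let counts := words.foldl (fun d w => d.insert w (d.getD w 0 + 1))
    (PySem.Dict.empty : PySem.Dict String Int)
  (counts.items.filter (fun p => p.2 == 1)).map (fun p => p.1)

-- ===== PRECONDITION & SPEC =====
def Spec_rare (A : String) (B : String) (out : List String) : Prop := out = rare_alt A B
instance (A : String) (B : String) (out : List String) : Decidable (Spec_rare A B out) := by unfold Spec_rare; infer_instance

-- ===== CLAIM (what is proved, stated in full; the proofs are below) =====
def Claim_equal_rare : Prop := ∀ (A : String) (B : String), Dom_rare A B → Spec_rare A B (rare A B)

-- ===== LEMMAS AND PROOFS =====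

-- A's branching count loop builds exactly Counter(xs)
lemma foldl_rareStep_eq_counter (xs : List String) :
    xs.foldl rareStep PySem.Dict.empty = PySem.Dict.counter xs := by
  have h : rareStep = fun d x => d.insert x (d.getD x 0 + 1) := by
    funext d x
    unfold rareStep
    by_cases h : d.contains x
    · simp [h]
    · simp only [Bool.not_eq_true] at h
      simp [h, PySem.Dict.getD_of_not_contains _ _ h]
  rw [h, PySem.Dict.foldl_insert_getD_add_one_eq_counter]

-- the combined-count filter splits into A-only-once and B-only-once parts, in order
lemma rare_core (a b : List String) :
    (PySem.Set.ofList a).filter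
        (fun i => ((a.count i : Int) == 1) && !(b.contains i))
      ++ (PySem.Set.ofList b).filter
        (fun i => ((b.count i : Int) == 1) && !(a.contains i))
    = (PySem.Set.ofList (a ++ b)).filter
        (fun k => (((a ++ b).count k : Int) == 1)) := by
  rw [PySem.Set.ofList_append, PySem.Set.update_eq_append_filter, List.filter_append,
    List.filter_filter]
  congr 1
  · apply List.filter_congr
    intro x hx
    have hxa : x ∈ a := (PySem.Set.mem_ofList a x).1 hx
    have h1 : 1 ≤ a.count x := List.one_le_count_iff.2 hxa
    simp only [List.count_append]
    rcases Nat.eq_zero_or_pos (b.count x) with hb | hb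
    · have hbm : x ∉ b := by
        intro h; exact absurd (List.one_le_count_iff.2 h) (by omega)
      simp [hb, hbm]
    · have hbm : x ∈ b := List.one_le_count_iff.1 hb
      have hne : ((a.count x + b.count x : Nat) : Int) ≠ 1 := by
        push_cast; omega
      push_cast at hne
      simp [hbm, hne]
  · apply List.filter_congr
    intro x hx
    have hxb : x ∈ b := (PySem.Set.mem_ofList b x).1 hx
    simp only [List.count_append, PySem.Set.contains_eq_listContains]
    by_cases ha : x ∈ a
    · simp [ha]
    · have ha0 : a.count x = 0 := List.count_eq_zero.2 ha
      simp [ha, ha0]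

-- ===== VERDICT (by name: the statement is the Claim_ definition above) =====
theorem rare_spec : Claim_equal_rare := by
  intro A B _
  unfold Spec_rare rare rare_alt
  simp only [foldl_rareStep_eq_counter, PySem.Dict.keys_counter,
    PySem.List.foldl_append_if, PySem.Dict.getD_counter, PySem.Dict.contains_counter,
    List.nil_append]
  rw [PySem.Dict.foldl_insert_getD_add_one_eq_counter, PySem.Dict.items_counter,
    List.filter_map, List.map_map]
  simpa [Function.comp_def] using rare_core (PySem.Str.split₀ A) (PySem.Str.split₀ B)
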